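-- pv_equiv track=rewrite | github.com/StarKnowData/trainee | PythonMath/数据结构与算法/DavidEppsteinPADS/pads/BFS.py | BreadthFirstLevels
-- ===== SOURCE A (Python) =====
-- def BreadthFirstLevels(G,root):
--     """
--     Generate a sequence of bipartite directed graphs, each consisting
--     of the edges from level i to level i+1 of G. Edges that connect
--     vertices within the same level are not included in the output.
--     The vertices in each level can be listed by iterating over each
--     output graph.
--     """
--     visited = set()
--     currentLevel = [root]
--     while currentLevel:
--         for v in currentLevel:
--             visited.add(v)
--         nextLevel = set()
--         levelGraph = {v:set() for v in currentLevel}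
--         for v in currentLevel:
--             for w in G[v]:
--                 if w not in visited:
--                     levelGraph[v].add(w)
--                     nextLevel.add(w)
--         yield levelGraph
--         currentLevel = nextLevel
-- ===== SOURCE B (Python) =====
-- from collections import deque
--
-- def BreadthFirstLevels(G, root):
--     """Label vertices with BFS distances using a queue, then emit each
--     level's forward-edge graph in a separate grouping pass."""
--     dist = {root: 0}
--     order = []
--     queue = deque([root])
--     while queue:
--         v = queue.popleft()
--         order.append(v)
--         for w in G[v]:
--             if w not in dist:
--                 dist[w] = dist[v] + 1
--                 queue.append(w)
--     maxd = dist[order[-1]]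
--     for d in range(maxd + 1):
--         yield {v: {w for w in G[v] if dist.get(w) == d + 1}
--                for v in order if dist[v] == d}
-- ===== Notes on version B (the rewrite author's own statement) =====
-- stated objective: alternative
-- what changed: Replaces the synchronous frontier-set loop (which builds each level's bipartite graph inline while discovering the next frontier) by a queue-based BFS that first labels every reachable vertex with its distance, followed by a separate grouping pass that emits, for each distance d, the dict of level-d vertices with their forward edges read off the distance table; Pre_ excludes only the inputs where A raises KeyError (a vertex reachable from root missing from G) and association lists with duplicate keys, which do not encode any Python dict input.
import Mathlib
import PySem

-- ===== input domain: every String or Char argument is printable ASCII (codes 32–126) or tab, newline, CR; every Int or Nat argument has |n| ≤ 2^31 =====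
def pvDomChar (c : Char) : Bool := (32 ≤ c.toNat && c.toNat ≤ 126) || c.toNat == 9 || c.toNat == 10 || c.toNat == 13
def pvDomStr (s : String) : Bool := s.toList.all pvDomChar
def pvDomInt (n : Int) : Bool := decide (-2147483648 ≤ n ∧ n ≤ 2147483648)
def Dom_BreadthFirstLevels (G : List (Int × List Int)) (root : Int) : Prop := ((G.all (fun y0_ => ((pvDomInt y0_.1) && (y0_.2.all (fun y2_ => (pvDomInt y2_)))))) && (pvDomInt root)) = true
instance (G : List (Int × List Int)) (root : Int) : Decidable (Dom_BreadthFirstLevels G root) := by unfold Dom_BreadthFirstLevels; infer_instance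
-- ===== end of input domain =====

-- B replaces A's synchronous frontier-set loop by a queue-based BFS that labels every
-- reachable vertex with its distance, followed by a separate grouping pass over the
-- distance table (objective: alternative; same asymptotic cost, return value identical).
-- A is a generator; both sides are compared as the list of yielded level graphs.

-- ===== PORT A =====

-- G[v] (inside Pre_ the key is always present; outside Pre_ Python raises KeyError)
def pvAdj (G : List (Int × List Int)) (v : Int) : List Int :=
  ((PySem.Dict.mk G).get? v).getD []

-- the while-loop of A: state (visited, currentLevel); fuel G.length + 1 is enough for
-- every input satisfying Pre_ (each iteration visits at least one new key of G)
def pvLoopA (G : List (Int × List Int)) : List Int → List Int → Nat → List (List (Int × List Int))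
  | _, _, 0 => []
  | visited, cur, fuel+1 =>
    if cur = [] then [] else
      -- for v in currentLevel: visited.add(v)
      let visited' := cur.foldl PySem.Set.add visited
      -- levelGraph = {v: set() for v in currentLevel}
      let lg0 : PySem.Dict Int (List Int) := cur.foldl (fun d v => d.insert v ([] : List Int)) PySem.Dict.empty
      -- for v in currentLevel: for w in G[v]: if w not in visited: levelGraph[v].add(w); nextLevel.add(w)
      let st := cur.foldl (fun (st : PySem.Dict Int (List Int) × List Int) v =>
        (pvAdj G v).foldl (fun st w =>
          if w ∈ visited' then st
          else (st.1.modify v [] (fun s => PySem.Set.add s w), PySem.Set.add st.2 w)) st)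
        (lg0, ([] : List Int))
      st.1.items :: pvLoopA G visited' st.2 fuel

def BreadthFirstLevels (G : List (Int × List Int)) (root : Int) : List (List (Int × List Int)) :=
  pvLoopA G [] [root] (G.length + 1)

-- ===== PORT B =====

-- for w in G[v]: if w not in dist: dist[w] = dist[v] + 1; queue.append(w)
def pvStepB (G : List (Int × List Int)) (v : Int) (st : PySem.Dict Int Int × List Int) :
    PySem.Dict Int Int × List Int :=
  (pvAdj G v).foldl (fun st w =>
    if st.1.contains w then st
    else (st.1.insert w (st.1.getD v 0 + 1), st.2 ++ [w])) st

-- the while-queue loop of B: state (dist, order, queue)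
def pvBfsLoop (G : List (Int × List Int)) :
    PySem.Dict Int Int → List Int → List Int → Nat → PySem.Dict Int Int × List Int
  | dist, order, _, 0 => (dist, order)
  | dist, order, [], _+1 => (dist, order)
  | dist, order, v :: q, fuel+1 =>
    let st := pvStepB G v (dist, q)
    pvBfsLoop G st.1 (order ++ [v]) st.2 fuel

-- the dict comprehension of one level d (keys: v in order with dist[v]==d;
-- value: {w for w in G[v] if dist.get(w) == d+1})
def pvGroup (G : List (Int × List Int)) (dist : PySem.Dict Int Int) (order : List Int) (d : Int) :
    List (Int × List Int) :=
  (PySem.Dict.ofList ((order.filter (fun v => dist.getD v (-1) == d)).map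
    (fun v => (v, (PySem.Set.ofList ((pvAdj G v).filter (fun w => dist.get? w == some (d+1))) : List Int))))).items

def BreadthFirstLevels_alt (G : List (Int × List Int)) (root : Int) : List (List (Int × List Int)) :=
  let p := pvBfsLoop G (PySem.Dict.ofList [(root, 0)]) [] [root] (G.length + 1)
  let maxd := p.1.getD ((PySem.List.pyGet? p.2 (-1)).getD 0) 0
  (PySem.List.pyRange 0 (maxd + 1)).map (pvGroup G p.1 p.2)

-- ===== PRECONDITION & SPEC =====

-- Pre_-side helper: the textbook reachable-set closure (NOT either port's algorithm):
-- repeatedly add the neighbours of every member until the set is stable; fuel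
-- 1 + (number of listed neighbours) rounds always reaches the fixpoint.
def pvExpand (G : List (Int × List Int)) (S : List Int) : List Int :=
  S.foldl (fun t v => PySem.Set.update t (pvAdj G v)) S

def pvIter (G : List (Int × List Int)) : Nat → List Int → List Int
  | 0, S => S
  | n+1, S => if pvExpand G S = S then S else pvIter G n (pvExpand G S)

-- the set of vertices reachable from root
def pvReachSet (G : List (Int × List Int)) (root : Int) : List Int :=
  pvIter G (root :: G.flatMap Prod.snd).length [root]

-- Pre_ excludes exactly the inputs on which Python A raises KeyError — those where some
-- vertex reachable from root (including root itself) is not a key of G — and association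
-- lists with duplicate keys, where the encoding of a Python dict is ambiguous.
def Pre_BreadthFirstLevels (G : List (Int × List Int)) (root : Int) : Prop :=
  (G.map Prod.fst).Nodup ∧ ∀ v ∈ pvReachSet G root, v ∈ G.map Prod.fst

instance (G : List (Int × List Int)) (root : Int) : Decidable (Pre_BreadthFirstLevels G root) := by
  unfold Pre_BreadthFirstLevels; infer_instance

def pvWitness_BreadthFirstLevels : (List (Int × List Int)) × Int := ([(0, [1]), (1, [])], 0)

def Spec_BreadthFirstLevels (G : List (Int × List Int)) (root : Int) (out : List (List (Int × List Int))) : Prop := out = BreadthFirstLevels_alt G root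
instance (G : List (Int × List Int)) (root : Int) (out : List (List (Int × List Int))) : Decidable (Spec_BreadthFirstLevels G root out) := by unfold Spec_BreadthFirstLevels; infer_instance

-- ===== CLAIM (what is proved, stated in full; the proofs are below) =====
def Claim_equal_BreadthFirstLevels : Prop := ∀ (G : List (Int × List Int)) (root : Int), Dom_BreadthFirstLevels G root → Pre_BreadthFirstLevels G root → Spec_BreadthFirstLevels G root (BreadthFirstLevels G root)

-- ===== LEMMAS AND PROOFS =====

-- ---- reachable-set lemmas (Pre_ gives closure of a set containing root) ----

lemma pvFoldUpdate_mem (G : List (Int × List Int)) (x : Int) :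
    ∀ (L t : List Int),
    x ∈ L.foldl (fun t v => PySem.Set.update t (pvAdj G v)) t ↔
      x ∈ t ∨ ∃ v ∈ L, x ∈ pvAdj G v := by
  intro L
  induction L with
  | nil => intro t; simp
  | cons v L ih =>
    intro t
    simp only [List.foldl_cons, ih, PySem.Set.mem_update, List.mem_cons]
    constructor
    · rintro (( h | h) | ⟨u, hu, hx⟩)
      · exact Or.inl h
      · exact Or.inr ⟨v, Or.inl rfl, h⟩
      · exact Or.inr ⟨u, Or.inr hu, hx⟩
    · rintro (h | ⟨u, (rfl | hu), hx⟩)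
      · exact Or.inl (Or.inl h)
      · exact Or.inl (Or.inr hx)
      · exact Or.inr ⟨u, hu, hx⟩

lemma pvExpand_mem (G : List (Int × List Int)) (S : List Int) (x : Int) :
    x ∈ pvExpand G S ↔ x ∈ S ∨ ∃ v ∈ S, x ∈ pvAdj G v :=
  pvFoldUpdate_mem G x S S

lemma pvFoldUpdate_prefix (G : List (Int × List Int)) :
    ∀ (L t : List Int), ∃ r, L.foldl (fun t v => PySem.Set.update t (pvAdj G v)) t = t ++ r := by
  intro L
  induction L with
  | nil => intro t; exact ⟨[], by simp⟩
  | cons v L ih =>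
    intro t
    obtain ⟨r, hr⟩ := ih (PySem.Set.update t (pvAdj G v))
    exact ⟨List.filter (fun y => !PySem.Set.contains t y) (PySem.Set.ofList (pvAdj G v)) ++ r,
      by rw [List.foldl_cons, hr, PySem.Set.update_eq_append_filter, List.append_assoc]⟩

lemma pvExpand_prefix (G : List (Int × List Int)) (S : List Int) :
    ∃ r, pvExpand G S = S ++ r :=
  pvFoldUpdate_prefix G S S

lemma pvExpand_nodup (G : List (Int × List Int)) :
    ∀ (L t : List Int), t.Nodup →
      (L.foldl (fun t v => PySem.Set.update t (pvAdj G v)) t).Nodup := by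
  intro L
  induction L with
  | nil => intro t h; exact h
  | cons v L ih =>
    intro t h
    exact ih _ (show (PySem.Set.update t (pvAdj G v)).Nodup from PySem.Set.nodup_update _ _ h)

lemma pvIter_mem (G : List (Int × List Int)) :
    ∀ (fuel : Nat) (S : List Int) (x : Int), x ∈ S → x ∈ pvIter G fuel S := by
  intro fuel
  induction fuel with
  | zero => intro S x h; exact h
  | succ n ih =>
    intro S x h
    by_cases hf : pvExpand G S = S
    · simp [pvIter, hf]; exact h
    · simp only [pvIter, hf, if_false]
      exact ih _ _ ((pvExpand_mem G S x).mpr (Or.inl h))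

lemma pvIter_fix (G : List (Int × List Int)) (U : List Int)
    (hadjU : ∀ v : Int, ∀ w ∈ pvAdj G v, w ∈ U) :
    ∀ (fuel : Nat) (S : List Int), S.Nodup → (∀ x ∈ S, x ∈ U) →
      U.length ≤ fuel + S.length →
      pvExpand G (pvIter G fuel S) = pvIter G fuel S := by
  intro fuel
  induction fuel with
  | zero =>
    intro S hnd hsub hlen
    show pvExpand G S = S
    obtain ⟨r, hr⟩ := pvExpand_prefix G S
    have hnd' : (pvExpand G S).Nodup := pvExpand_nodup G S S hnd
    have hsub' : pvExpand G S ⊆ U := by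
      intro x hx
      rcases (pvExpand_mem G S x).mp hx with h | ⟨v, _, hv⟩
      · exact hsub x h
      · exact hadjU v x hv
    have hle : (pvExpand G S).length ≤ U.length :=
      (List.subperm_of_subset hnd' hsub').length_le
    have : r = [] := by
      rw [hr, List.length_append] at hle
      simp at hlen
      have : r.length = 0 := by omega
      exact List.eq_nil_of_length_eq_zero this
    rw [hr, this, List.append_nil]
  | succ n ih =>
    intro S hnd hsub hlen
    by_cases hf : pvExpand G S = S
    · simp [pvIter, hf]
    · simp only [pvIter, hf, if_false]
      obtain ⟨r, hr⟩ := pvExpand_prefix G S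
      have hrne : r ≠ [] := by
        intro h; exact hf (by rw [hr, h, List.append_nil])
      have hrlen : 1 ≤ r.length := List.length_pos_iff.mpr hrne
      refine ih (pvExpand G S) (pvExpand_nodup G S S hnd) ?_ ?_
      · intro x hx
        rcases (pvExpand_mem G S x).mp hx with h | ⟨v, _, hv⟩
        · exact hsub x h
        · exact hadjU v x hv
      · rw [hr, List.length_append]; omega

lemma pvAdj_sub (G : List (Int × List Int)) (hnd : (G.map Prod.fst).Nodup)
    (v : Int) : ∀ w ∈ pvAdj G v, w ∈ G.flatMap Prod.snd := by
  intro w hw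
  unfold pvAdj at hw
  cases hg : (PySem.Dict.mk G).get? v with
  | none => rw [hg] at hw; simp at hw
  | some ns =>
    rw [hg] at hw
    have hmem : (v, ns) ∈ G :=
      (PySem.Dict.get?_eq_some_iff_mem_items (PySem.Dict.mk G) v ns
        (by rw [PySem.Dict.keys_mk]; exact hnd)).mp hg
    exact List.mem_flatMap.mpr ⟨(v, ns), hmem, by simpa using hw⟩

lemma pvReachSet_root (G : List (Int × List Int)) (root : Int) :
    root ∈ pvReachSet G root :=
  pvIter_mem G _ [root] root (by simp)

lemma pvReachSet_closed (G : List (Int × List Int)) (hnd : (G.map Prod.fst).Nodup)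
    (root : Int) :
    ∀ v ∈ pvReachSet G root, ∀ w ∈ pvAdj G v, w ∈ pvReachSet G root := by
  intro v hv w hw
  have hadjU : ∀ u : Int, ∀ w ∈ pvAdj G u, w ∈ root :: G.flatMap Prod.snd := by
    intro u x hx
    exact List.mem_cons_of_mem _ (pvAdj_sub G hnd u x hx)
  have hfix := pvIter_fix G (root :: G.flatMap Prod.snd) hadjU
    (root :: G.flatMap Prod.snd).length [root] (by simp)
    (by intro x hx; rw [List.mem_singleton.mp hx]; exact List.mem_cons_self ..)
    (by simp)
  show w ∈ pvReachSet G root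
  unfold pvReachSet
  rw [← hfix]
  exact (pvExpand_mem G _ w).mpr (Or.inr ⟨v, hv, hw⟩)

-- ---- proof-side abbreviations ----

-- the forward edges of v at a level whose already-visited set is V
def pvEdges (G : List (Int × List Int)) (V : List Int) (v : Int) : List Int :=
  (pvAdj G v).filter (fun w => !decide (w ∈ V))

-- the inner edge-scan of one level, with the queue accumulator separated out
def pvScanB (G : List (Int × List Int)) (dist : PySem.Dict Int Int) (cur : List Int) :
    PySem.Dict Int Int × List Int :=
  cur.foldl (fun st v => pvStepB G v st) (dist, [])

-- ---- B-side queue-shape lemmas ----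

lemma pvStepB_split (G : List (Int × List Int)) (v : Int) (d : PySem.Dict Int Int)
    (a b : List Int) :
    pvStepB G v (d, a ++ b) = ((pvStepB G v (d, b)).1, a ++ (pvStepB G v (d, b)).2) := by
  unfold pvStepB
  induction pvAdj G v generalizing d b with
  | nil => simp
  | cons w ws ih =>
    simp only [List.foldl_cons]
    by_cases hc : d.contains w = true
    · simp only [hc, if_true]
      exact ih d b
    · simp only [hc, if_false, Bool.false_eq_true]
      rw [List.append_assoc]
      exact ih _ (b ++ [w])

lemma pvScanB_acc (G : List (Int × List Int)) (cur : List Int) (d : PySem.Dict Int Int)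
    (a : List Int) :
    cur.foldl (fun st v => pvStepB G v st) (d, a)
      = ((pvScanB G d cur).1, a ++ (pvScanB G d cur).2) := by
  induction cur generalizing d a with
  | nil => simp [pvScanB]
  | cons v cur ih =>
    simp only [pvScanB, List.foldl_cons] at *
    have h1 : pvStepB G v (d, a) = ((pvStepB G v (d, [])).1, a ++ (pvStepB G v (d, [])).2) := by
      have := pvStepB_split G v d a []
      simpa using this
    rw [h1, ih, ih (pvStepB G v (d, [])).1 (pvStepB G v (d, [])).2, List.append_assoc]

lemma pvBfs_chunk (G : List (Int × List Int)) :
    ∀ (cur q0 : List Int) (d : PySem.Dict Int Int) (ord : List Int) (fuel : Nat),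
    cur.length ≤ fuel →
    pvBfsLoop G d ord (cur ++ q0) fuel
      = pvBfsLoop G (pvScanB G d cur).1 (ord ++ cur) (q0 ++ (pvScanB G d cur).2)
          (fuel - cur.length) := by
  intro cur
  induction cur with
  | nil => intro q0 d ord fuel h; simp [pvScanB]
  | cons v cur ih =>
    intro q0 d ord fuel h
    obtain ⟨f, rfl⟩ : ∃ f, fuel = f + 1 := ⟨fuel - 1, by simp at h; omega⟩
    have hsplit : pvStepB G v (d, cur ++ q0)
        = ((pvStepB G v (d, [])).1, (cur ++ q0) ++ (pvStepB G v (d, [])).2) := by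
      simpa using pvStepB_split G v d (cur ++ q0) []
    have hscan : pvScanB G d (v :: cur)
        = ((pvScanB G (pvStepB G v (d, [])).1 cur).1,
           (pvStepB G v (d, [])).2 ++ (pvScanB G (pvStepB G v (d, [])).1 cur).2) := by
      simp only [pvScanB, List.foldl_cons]
      exact pvScanB_acc G cur (pvStepB G v (d, [])).1 (pvStepB G v (d, [])).2
    simp only [List.cons_append, pvBfsLoop, hsplit]
    rw [List.append_assoc cur q0]
    rw [ih (q0 ++ (pvStepB G v (d, [])).2) (pvStepB G v (d, [])).1 (ord ++ [v]) f
      (by simp at h ⊢; omega)]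
    rw [hscan]
    simp only [List.length_cons, Nat.succ_sub_succ, List.append_assoc, List.singleton_append]

-- ---- A-side level-scan characterisation ----

lemma pvScanA_inner (V' : List Int) (v : Int) :
    ∀ (ws : List Int) (lg : PySem.Dict Int (List Int)) (nl : List Int),
    (ws.foldl (fun (st : PySem.Dict Int (List Int) × List Int) w =>
        if w ∈ V' then st
        else (st.1.modify v [] (fun s => PySem.Set.add s w), PySem.Set.add st.2 w)) (lg, nl))
      = (
        (ws.filter (fun w => !decide (w ∈ V'))).foldl (fun d w => d.modify v [] (fun s => PySem.Set.add s w)) lg,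
        PySem.Set.update nl (ws.filter (fun w => !decide (w ∈ V')))) := by
  intro ws
  induction ws with
  | nil => intro lg nl; simp [PySem.Set.update]
  | cons w ws ih =>
    intro lg nl
    simp only [List.foldl_cons, List.filter_cons]
    by_cases hw : w ∈ V'
    · simp only [hw, if_pos, decide_true, Bool.not_true, Bool.false_eq_true, if_false]
      exact ih lg nl
    · simp only [hw, if_neg, not_false_iff, decide_false, Bool.not_false, if_true]
      rw [ih]
      rfl

lemma pvModifyFold_getD (v : Int) :
    ∀ (ws : List Int) (lg : PySem.Dict Int (List Int)) (v' : Int),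
    (ws.foldl (fun d w => d.modify v [] (fun s => PySem.Set.add s w)) lg).getD v' []
      = if v' = v then PySem.Set.update (lg.getD v []) ws else lg.getD v' [] := by
  intro ws
  induction ws with
  | nil => intro lg v'; split_ifs with h <;> simp [PySem.Set.update, h]
  | cons w ws ih =>
    intro lg v'
    simp only [List.foldl_cons]
    rw [ih]
    by_cases h : v' = v
    · subst h
      rw [if_pos rfl, if_pos rfl, PySem.Dict.getD_modify, if_pos rfl]
      rfl
    · rw [if_neg h, if_neg h, PySem.Dict.getD_modify, if_neg h]

lemma pvModifyFold_keys (v : Int) :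
    ∀ (ws : List Int) (lg : PySem.Dict Int (List Int)), lg.contains v = true →
    (ws.foldl (fun d w => d.modify v [] (fun s => PySem.Set.add s w)) lg).keys = lg.keys := by
  intro ws
  induction ws with
  | nil => intro lg _; rfl
  | cons w ws ih =>
    intro lg hv
    simp only [List.foldl_cons]
    have hk : (lg.modify v [] (fun s => PySem.Set.add s w)).keys = lg.keys := by
      rw [PySem.Dict.keys_modify, PySem.Dict.keys_insert_of_contains _ _ hv]
    have hc : (lg.modify v [] (fun s => PySem.Set.add s w)).contains v = true := by
      rw [PySem.Dict.contains_iff_mem_keys, hk, ← PySem.Dict.contains_iff_mem_keys]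
      exact hv
    rw [ih _ hc, hk]

lemma pvScanA_outer (G : List (Int × List Int)) (V' : List Int) :
    ∀ (todo : List Int) (lg : PySem.Dict Int (List Int)) (nl : List Int),
    todo.Nodup → (∀ v ∈ todo, lg.contains v = true) →
    (todo.foldl (fun (st : PySem.Dict Int (List Int) × List Int) v =>
        (pvAdj G v).foldl (fun st w =>
          if w ∈ V' then st
          else (st.1.modify v [] (fun s => PySem.Set.add s w), PySem.Set.add st.2 w)) st)
        (lg, nl)).2 = PySem.Set.update nl (todo.flatMap (pvEdges G V' ·))
    ∧ (todo.foldl (fun (st : PySem.Dict Int (List Int) × List Int) v =>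
        (pvAdj G v).foldl (fun st w =>
          if w ∈ V' then st
          else (st.1.modify v [] (fun s => PySem.Set.add s w), PySem.Set.add st.2 w)) st)
        (lg, nl)).1.keys = lg.keys
    ∧ (∀ v', (todo.foldl (fun (st : PySem.Dict Int (List Int) × List Int) v =>
        (pvAdj G v).foldl (fun st w =>
          if w ∈ V' then st
          else (st.1.modify v [] (fun s => PySem.Set.add s w), PySem.Set.add st.2 w)) st)
        (lg, nl)).1.getD v' []
          = if v' ∈ todo then PySem.Set.update (lg.getD v' []) (pvEdges G V' v')
            else lg.getD v' []) := by
  intro todo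
  induction todo with
  | nil => intro lg nl _ _; exact ⟨by simp [PySem.Set.update], rfl, by intro v'; simp⟩
  | cons v todo ih =>
    intro lg nl hnd hct
    simp only [List.foldl_cons, pvScanA_inner V' v (pvAdj G v) lg nl]
    have hE : List.filter (fun w => !decide (w ∈ V')) (pvAdj G v) = pvEdges G V' v := rfl
    rw [hE]
    have hcv : lg.contains v = true := hct v (List.mem_cons_self ..)
    set lg₁ := (pvEdges G V' v).foldl (fun d w => d.modify v [] (fun s => PySem.Set.add s w)) lg with hlg₁
    have hk1 : lg₁.keys = lg.keys := pvModifyFold_keys v (pvEdges G V' v) lg hcv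
    have hct1 : ∀ u ∈ todo, lg₁.contains u = true := by
      intro u hu
      rw [PySem.Dict.contains_iff_mem_keys, hk1, ← PySem.Dict.contains_iff_mem_keys]
      exact hct u (List.mem_cons_of_mem _ hu)
    have hgd1 : ∀ v', lg₁.getD v' []
        = if v' = v then PySem.Set.update (lg.getD v []) (pvEdges G V' v) else lg.getD v' [] :=
      fun v' => pvModifyFold_getD v (pvEdges G V' v) lg v'
    obtain ⟨c1, c2, c3⟩ := ih lg₁ (PySem.Set.update nl (pvEdges G V' v)) hnd.of_cons hct1
    have hvnt : v ∉ todo := (List.nodup_cons.mp hnd).1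
    refine ⟨?_, by rw [c2, hk1], ?_⟩
    · rw [c1, List.flatMap_cons, PySem.Set.update, PySem.Set.update, PySem.Set.update,
        List.foldl_append]
    · intro v'
      rw [c3 v']
      by_cases hv' : v' = v
      · subst hv'
        simp [hvnt, hgd1 v']
      · by_cases ht : v' ∈ todo <;> simp [ht, hv', hgd1 v']

-- the level scan of A: final items list and next frontier, in closed form
lemma pvScanA_spec (G : List (Int × List Int)) (V' : List Int) (cur : List Int)
    (hnd : cur.Nodup) :
    (cur.foldl (fun (st : PySem.Dict Int (List Int) × List Int) v =>
        (pvAdj G v).foldl (fun st w =>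
          if w ∈ V' then st
          else (st.1.modify v [] (fun s => PySem.Set.add s w), PySem.Set.add st.2 w)) st)
        (cur.foldl (fun d v => d.insert v ([] : List Int)) PySem.Dict.empty, ([] : List Int)))
      = (PySem.Dict.mk (cur.map (fun v => (v, (PySem.Set.ofList (pvEdges G V' v) : List Int)))),
         PySem.Set.ofList (cur.flatMap (pvEdges G V' ·))) := by
  have hupd : ∀ xs : List Int, PySem.Set.update ([] : List Int) xs = PySem.Set.ofList xs :=
    fun xs => (PySem.Set.ofList_eq_foldl xs).symm
  set lg0 := cur.foldl (fun d v => d.insert v ([] : List Int)) PySem.Dict.empty with hlg0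
  have hitems0 : lg0.items = cur.map (fun v => (v, ([] : List Int))) := by
    have h := PySem.Dict.items_foldl_insert_fresh (l := cur) (k := fun v => v)
      (v := fun _ => ([] : List Int)) (d := PySem.Dict.empty)
      (by intro a _; simp [PySem.Dict.contains_empty]) (by simpa using hnd)
    simpa using h
  have hkeys0 : lg0.keys = cur := by
    simp only [PySem.Dict.keys, hitems0, List.map_map]
    exact (List.map_congr_left (fun v _ => rfl)).trans (List.map_id cur)
  have hct0 : ∀ v ∈ cur, lg0.contains v = true := by
    intro v hv; rw [PySem.Dict.contains_iff_mem_keys, hkeys0]; exact hv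
  have hgd0 : ∀ v', lg0.getD v' [] = [] := by
    intro v'
    by_cases hc : lg0.contains v' = true
    · obtain ⟨x, hx⟩ := Option.isSome_iff_exists.mp
        (show (lg0.get? v').isSome = true by
          rw [← PySem.Dict.contains_eq_isSome_get? lg0 v']; exact hc)
      have hmem := (PySem.Dict.get?_eq_some_iff_mem_items lg0 v' x
        (by rw [hkeys0]; exact hnd)).mp hx
      rw [hitems0] at hmem
      obtain ⟨u, _, huv⟩ := List.mem_map.mp hmem
      have hx0 : x = [] := (Prod.mk.injEq _ _ _ _ ▸ huv).2.symm ▸ rfl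
      rw [PySem.Dict.getD_eq_get?_getD, hx, hx0]; rfl
    · exact PySem.Dict.getD_of_not_contains _ _ (by simpa using hc)
  obtain ⟨c1, c2, c3⟩ := pvScanA_outer G V' cur lg0 [] hnd hct0
  refine Prod.ext_iff.mpr ⟨?_, ?_⟩
  · apply PySem.Dict.ext
    rw [PySem.Dict.items_eq_map_keys _ (by rw [c2, hkeys0]; exact hnd) ([] : List Int)]
    rw [c2, hkeys0]
    show cur.map _ = cur.map _
    apply List.map_congr_left
    intro v hv
    rw [c3 v, if_pos hv, hgd0 v, hupd]
  · rw [c1, hupd]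

-- ---- B-side level-scan invariant ----

lemma pvSetAdd_of_not_mem {s : List Int} {w : Int} (h : w ∉ s) :
    PySem.Set.add s w = s ++ [w] := by
  simp [PySem.Set.add, PySem.Set.contains, h]

lemma pvSetAdd_of_mem {s : List Int} {w : Int} (h : w ∈ s) : PySem.Set.add s w = s := by
  simp [PySem.Set.add, PySem.Set.contains, h]

-- one dequeue step of B preserves the correspondence with A's level scan
lemma pvStepB_fold_inv (G : List (Int × List Int)) (V' : List Int)
    (dist : PySem.Dict Int Int) (d : Int) (v : Int)
    (hv : dist.get? v = some d) (hvV : v ∈ V') :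
    ∀ (ws : List Int) (dist' : PySem.Dict Int Int) (acc' : List Int),
    (∀ w ∈ ws, w ∈ G.map Prod.fst) →
    (∀ w, dist'.contains w = true ↔ w ∈ V' ∨ w ∈ acc') →
    (∀ w ∈ acc', dist'.get? w = some (d + 1)) →
    (∀ w ∈ V', dist'.get? w = dist.get? w) →
    dist'.keys.Nodup →
    dist'.size = dist.size + acc'.length →
    (∀ w, dist'.contains w = true → w ∈ G.map Prod.fst) →
    (ws.foldl (fun (st : PySem.Dict Int Int × List Int) w =>
        if st.1.contains w then st
        else (st.1.insert w (st.1.getD v 0 + 1), st.2 ++ [w])) (dist', acc')).2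
        = PySem.Set.update acc' (ws.filter (fun w => !decide (w ∈ V')))
    ∧ (let r := ws.foldl (fun (st : PySem.Dict Int Int × List Int) w =>
        if st.1.contains w then st
        else (st.1.insert w (st.1.getD v 0 + 1), st.2 ++ [w])) (dist', acc')
      (∀ w, r.1.contains w = true ↔ w ∈ V' ∨ w ∈ r.2)
      ∧ (∀ w ∈ r.2, r.1.get? w = some (d + 1))
      ∧ (∀ w ∈ V', r.1.get? w = dist.get? w)
      ∧ r.1.keys.Nodup
      ∧ r.1.size = dist.size + r.2.length
      ∧ (∀ w, r.1.contains w = true → w ∈ G.map Prod.fst)) := by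
  intro ws
  induction ws with
  | nil =>
    intro dist' acc' _ h1 h2 h3 h4 h5 h6
    exact ⟨by simp [PySem.Set.update], h1, h2, h3, h4, h5, h6⟩
  | cons w ws ih =>
    intro dist' acc' hadj h1 h2 h3 h4 h5 h6
    simp only [List.foldl_cons, List.filter_cons]
    by_cases hc : dist'.contains w = true
    · rw [if_pos hc]
      have hmem := (h1 w).mp hc
      obtain ⟨r1, rest⟩ := ih dist' acc' (fun u hu => hadj u (List.mem_cons_of_mem _ hu))
        h1 h2 h3 h4 h5 h6
      refine ⟨?_, rest⟩
      rw [r1]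
      by_cases hV : w ∈ V'
      · simp [hV]
      · have hacc : w ∈ acc' := hmem.resolve_left hV
        simp only [hV, decide_false, Bool.not_false, if_true]
        rw [show PySem.Set.update acc' (w :: List.filter (fun w => !decide (w ∈ V')) ws)
            = PySem.Set.update (PySem.Set.add acc' w) (List.filter (fun w => !decide (w ∈ V')) ws) from rfl,
          pvSetAdd_of_mem hacc]
    · rw [if_neg hc]
      have hnmem : ¬(w ∈ V' ∨ w ∈ acc') := fun h => hc ((h1 w).mpr h)
      push Not at hnmem
      obtain ⟨hwV, hwacc⟩ := hnmem
      have hgv : dist'.getD v 0 = d := by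
        rw [PySem.Dict.getD_eq_get?_getD, h3 v hvV, hv]; rfl
      rw [hgv]
      have h1' : ∀ u, (dist'.insert w (d + 1)).contains u = true ↔ u ∈ V' ∨ u ∈ acc' ++ [w] := by
        intro u
        rw [PySem.Dict.contains_insert]
        simp only [List.mem_append, List.mem_singleton, Bool.or_eq_true, beq_iff_eq]
        rw [h1 u]
        tauto
      have h2' : ∀ u ∈ acc' ++ [w], (dist'.insert w (d + 1)).get? u = some (d + 1) := by
        intro u hu
        rcases List.mem_append.mp hu with hu | hu
        · rw [PySem.Dict.get?_insert_of_ne dist' (d + 1)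
            (show u ≠ w from fun he => hwacc (he ▸ hu))]
          exact h2 u hu
        · rw [List.mem_singleton.mp hu, PySem.Dict.get?_insert_self]
      have h3' : ∀ u ∈ V', (dist'.insert w (d + 1)).get? u = dist.get? u := by
        intro u hu
        rw [PySem.Dict.get?_insert_of_ne dist' (d + 1)
          (show u ≠ w from fun he => hwV (he ▸ hu))]
        exact h3 u hu
      have h5' : (dist'.insert w (d + 1)).size = dist.size + (acc' ++ [w]).length := by
        rw [PySem.Dict.size_insert, if_neg (by simp [hc]), h5]
        simp
        omega
      have h6' : ∀ u, (dist'.insert w (d + 1)).contains u = true → u ∈ G.map Prod.fst := by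
        intro u hu
        rw [PySem.Dict.contains_insert] at hu
        rcases Bool.or_eq_true_iff.mp hu with hu | hu
        · exact (beq_iff_eq.mp hu) ▸ hadj w (List.mem_cons_self ..)
        · exact h6 u hu
      obtain ⟨r1, rest⟩ := ih (dist'.insert w (d + 1)) (acc' ++ [w])
        (fun u hu => hadj u (List.mem_cons_of_mem _ hu)) h1' h2' h3'
        (PySem.Dict.nodup_keys_insert _ _ _ h4) h5' h6'
      refine ⟨?_, rest⟩
      rw [r1]
      simp only [hwV, decide_false, Bool.not_false, if_true]
      rw [show PySem.Set.update acc' (w :: List.filter (fun w => !decide (w ∈ V')) ws)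
          = PySem.Set.update (PySem.Set.add acc' w) (List.filter (fun w => !decide (w ∈ V')) ws) from rfl,
        pvSetAdd_of_not_mem hwacc]

-- the whole level scan of B matches A's next frontier and extends dist by level d+1
lemma pvScanB_inv (G : List (Int × List Int)) (V' : List Int)
    (dist : PySem.Dict Int Int) (d : Int) :
    ∀ (todo : List Int) (dist' : PySem.Dict Int Int) (acc' : List Int),
    (∀ v ∈ todo, dist.get? v = some d ∧ v ∈ V') →
    (∀ v ∈ todo, ∀ w ∈ pvAdj G v, w ∈ G.map Prod.fst) →
    (∀ w, dist'.contains w = true ↔ w ∈ V' ∨ w ∈ acc') →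
    (∀ w ∈ acc', dist'.get? w = some (d + 1)) →
    (∀ w ∈ V', dist'.get? w = dist.get? w) →
    dist'.keys.Nodup →
    dist'.size = dist.size + acc'.length →
    (∀ w, dist'.contains w = true → w ∈ G.map Prod.fst) →
    (todo.foldl (fun st v => pvStepB G v st) (dist', acc')).2
        = PySem.Set.update acc' (todo.flatMap (pvEdges G V' ·))
    ∧ (let r := todo.foldl (fun st v => pvStepB G v st) (dist', acc')
      (∀ w, r.1.contains w = true ↔ w ∈ V' ∨ w ∈ r.2)
      ∧ (∀ w ∈ r.2, r.1.get? w = some (d + 1))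
      ∧ (∀ w ∈ V', r.1.get? w = dist.get? w)
      ∧ r.1.keys.Nodup
      ∧ r.1.size = dist.size + r.2.length
      ∧ (∀ w, r.1.contains w = true → w ∈ G.map Prod.fst)) := by
  intro todo
  induction todo with
  | nil =>
    intro dist' acc' _ _ h1 h2 h3 h4 h5 h6
    exact ⟨by simp [PySem.Set.update], h1, h2, h3, h4, h5, h6⟩
  | cons v todo ih =>
    intro dist' acc' hcur hadj h1 h2 h3 h4 h5 h6
    simp only [List.foldl_cons]
    obtain ⟨hvd, hvV⟩ := hcur v (List.mem_cons_self ..)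
    obtain ⟨s1, s2, s3, s4, s5, s6, s7⟩ := pvStepB_fold_inv G V' dist d v hvd hvV
      (pvAdj G v) dist' acc' (hadj v (List.mem_cons_self ..)) h1 h2 h3 h4 h5 h6
    have s1' : (pvStepB G v (dist', acc')).2 = PySem.Set.update acc' (pvEdges G V' v) := s1
    obtain ⟨r1, rest⟩ := ih (pvStepB G v (dist', acc')).1 (pvStepB G v (dist', acc')).2
      (fun u hu => hcur u (List.mem_cons_of_mem _ hu))
      (fun u hu => hadj u (List.mem_cons_of_mem _ hu)) s2 s3 s4 s5 s6 s7
    have r1' : (todo.foldl (fun st v => pvStepB G v st) (pvStepB G v (dist', acc'))).2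
        = PySem.Set.update (pvStepB G v (dist', acc')).2 (todo.flatMap (pvEdges G V' ·)) := r1
    constructor
    · rw [r1', s1', List.flatMap_cons, PySem.Set.update, PySem.Set.update, PySem.Set.update,
        List.foldl_append]
    · exact rest

-- ---- small helpers for the master simulation ----

lemma pvPyGetLast (xs : List Int) : PySem.List.pyGet? xs (-1) = xs.getLast? := by
  cases xs with
  | nil => rfl
  | cons a l =>
    have h : (a :: l : List Int) ≠ [] := by simp
    have hn : 0 < (a :: l).length := List.length_pos_iff.mpr h
    have h1 : ¬ (0:Int) ≤ -1 := by omega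
    have h2 : -((a :: l).length:Int) ≤ -1 := by omega
    rw [List.getLast?_eq_some_getLast h]
    simp only [PySem.List.pyGet?, PySem.List.pyIdx?, h1, if_false, h2, if_true]
    rw [List.getLast_eq_getElem]
    norm_num
    rfl

lemma pvDictOfList_items (L : List (Int × List Int)) (h : (L.map Prod.fst).Nodup) :
    (PySem.Dict.ofList L).items = L := by
  have := PySem.Dict.items_foldl_insert_fresh (l := L) (k := Prod.fst) (v := Prod.snd)
    (d := PySem.Dict.empty) (by intro a _; simp [PySem.Dict.contains_empty]) h
  simpa using this

-- ---- the master simulation ----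

lemma pvMaster (G : List (Int × List Int)) (R : List Int) (hRsub : ∀ v ∈ R, v ∈ G.map Prod.fst)
    (hRcl : ∀ v ∈ R, ∀ w ∈ pvAdj G v, w ∈ R) :
    ∀ (fuelA : Nat) (V cur : List Int) (dist : PySem.Dict Int Int) (order : List Int)
      (d : Int) (fuelB : Nat),
    (∀ v ∈ cur, v ∈ R) →
    (∀ w, dist.contains w = true ↔ w ∈ V ∨ w ∈ cur) →
    (∀ v ∈ cur, dist.get? v = some d) →
    (∀ w j, dist.get? w = some j → j ≤ d) →
    cur.Nodup →
    (∀ v ∈ order, ∃ j, dist.get? v = some j ∧ j < d) →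
    (∀ h : order ≠ [], dist.get? (order.getLast h) = some (d - 1)) →
    (order = [] → cur ≠ []) →
    (∀ w, dist.contains w = true → w ∈ G.map Prod.fst) →
    dist.keys.Nodup →
    1 + (G.length - dist.size) ≤ fuelA →
    cur.length + (G.length - dist.size) ≤ fuelB →
    (pvLoopA G V cur fuelA
        = (PySem.List.pyRange d
            ((pvBfsLoop G dist order cur fuelB).1.getD
              ((PySem.List.pyGet? (pvBfsLoop G dist order cur fuelB).2 (-1)).getD 0) 0 + 1)).map
            (pvGroup G (pvBfsLoop G dist order cur fuelB).1 (pvBfsLoop G dist order cur fuelB).2))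
      ∧ (∀ w j, dist.get? w = some j → (pvBfsLoop G dist order cur fuelB).1.get? w = some j)
      ∧ (∀ w j, (pvBfsLoop G dist order cur fuelB).1.get? w = some j →
            dist.get? w = some j ∨ d < j)
      ∧ (∃ rest, (pvBfsLoop G dist order cur fuelB).2 = order ++ rest ∧
            ∀ v ∈ rest, ∃ j, (pvBfsLoop G dist order cur fuelB).1.get? v = some j ∧ d ≤ j) := by
  intro fuelA
  induction fuelA with
  | zero => intro V cur dist order d fuelB _ _ _ _ _ _ _ _ _ _ HfA _; omega
  | succ fA ih =>
    intro V cur dist order d fuelB HcurR H1 H2 H3 H4 H5 H6 H7 H8 H9 HfA HfB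
    by_cases hcur : cur = []
    · -- terminal case: the queue is empty, A's loop stops, B's range is empty
      subst hcur
      have horder : order ≠ [] := fun h => (H7 h) rfl
      have hB : pvBfsLoop G dist order [] fuelB = (dist, order) := by
        cases fuelB <;> rfl
      rw [hB]
      refine ⟨?_, fun w j h => h, fun w j h => Or.inl h, ⟨[], by simp, by simp⟩⟩
      have hmax : (dist, order).1.getD ((PySem.List.pyGet? (dist, order).2 (-1)).getD 0) 0
          = d - 1 := by
        show dist.getD ((PySem.List.pyGet? order (-1)).getD 0) 0 = d - 1
        rw [pvPyGetLast order, List.getLast?_eq_some_getLast horder]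
        rw [Option.getD_some, PySem.Dict.getD_eq_get?_getD, H6 horder, Option.getD_some]
      rw [hmax]
      have hrange : PySem.List.pyRange d (d - 1 + 1) = [] := by
        have : d - 1 + 1 = d := by omega
        rw [this]
        simp [PySem.List.pyRange]
      rw [hrange]
      simp [pvLoopA]
    · -- step case: A runs one level, B dequeues the whole current level
      have hmemV' : ∀ w, w ∈ cur.foldl PySem.Set.add V ↔ w ∈ V ∨ w ∈ cur :=
        fun w => PySem.Set.mem_update V cur w
      set V' := cur.foldl PySem.Set.add V with hV'
      have hcontV' : ∀ w, dist.contains w = true ↔ w ∈ V' := by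
        intro w; rw [H1 w, hmemV']
      have hadj : ∀ v ∈ cur, ∀ w ∈ pvAdj G v, w ∈ G.map Prod.fst := by
        intro v hv w hw
        exact hRsub w (hRcl v (HcurR v hv) w hw)
      -- B's scan of the whole level
      obtain ⟨b1, b2, b3, b4, b5, b6, b7⟩ := pvScanB_inv G V' dist d cur dist []
        (fun v hv => ⟨H2 v hv, (hmemV' v).mpr (Or.inr hv)⟩) hadj
        (by intro w; rw [hcontV' w]; simp)
        (by simp) (fun w _ => rfl) H9 (by simp) H8
      have hfold : (cur.foldl (fun st v => pvStepB G v st) (dist, ([] : List Int)))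
          = pvScanB G dist cur := rfl
      rw [hfold] at b1 b2 b3 b4 b5 b6 b7
      set dist₁ := (pvScanB G dist cur).1 with hdist₁
      set nl := PySem.Set.ofList (cur.flatMap (pvEdges G V' ·)) with hnl
      have hnlraw : (pvScanB G dist cur).2 = nl := by
        rw [hnl, PySem.Set.ofList_eq_foldl]
        exact b1
      have hnlR : ∀ v ∈ nl, v ∈ R := by
        intro x hx
        rw [hnl] at hx
        have hx' := (PySem.Set.mem_ofList _ _).mp hx
        obtain ⟨v, hv, hxe⟩ := List.mem_flatMap.mp hx'
        have hxadj : x ∈ pvAdj G v := List.mem_of_mem_filter hxe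
        exact hRcl v (HcurR v hv) x hxadj
      -- the chunk step: running B's loop on the level's queue
      have hchunk : pvBfsLoop G dist order cur fuelB
          = pvBfsLoop G dist₁ (order ++ cur) nl (fuelB - cur.length) := by
        have h := pvBfs_chunk G cur [] dist order fuelB (by omega)
        simpa [hnlraw] using h
      rw [hchunk]
      set p := pvBfsLoop G dist₁ (order ++ cur) nl (fuelB - cur.length) with hp
      -- facts about dist₁ restated through hnlraw
      have c1 : ∀ w, dist₁.contains w = true ↔ w ∈ V' ∨ w ∈ nl := by
        intro w; rw [hdist₁, b2, hnlraw]
      have c2 : ∀ w ∈ nl, dist₁.get? w = some (d + 1) := by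
        intro w hw; rw [hdist₁]; exact b3 w (hnlraw ▸ hw)
      have c3 : ∀ w ∈ V', dist₁.get? w = dist.get? w := fun w hw => b4 w hw
      have c5 : dist₁.keys.Nodup := b5
      have c6 : dist₁.size = dist.size + nl.length := by rw [hdist₁, b6, hnlraw]
      have c7 : ∀ w, dist₁.contains w = true → w ∈ G.map Prod.fst := b7
      -- distances in dist are defined exactly on V'
      have hVval : ∀ w ∈ V', ∃ j, dist.get? w = some j ∧ j ≤ d := by
        intro w hw
        have hc : dist.contains w = true := (hcontV' w).mpr hw
        obtain ⟨j, hj⟩ := Option.isSome_iff_exists.mp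
          (show (dist.get? w).isSome = true by
            rw [← PySem.Dict.contains_eq_isSome_get? dist w]; exact hc)
        exact ⟨j, hj, H3 w j hj⟩
      have hsome_mem : ∀ w j, dist.get? w = some j → w ∈ V' := by
        intro w j hj
        apply (hcontV' w).mp
        rw [PySem.Dict.contains_eq_isSome_get?, hj]; rfl
      -- sizes
      have hkeylen : ∀ (dd : PySem.Dict Int Int), dd.keys.Nodup →
          (∀ w, dd.contains w = true → w ∈ G.map Prod.fst) → dd.size ≤ G.length := by
        intro dd hknd hsub
        have hsp : dd.keys.Subperm (G.map Prod.fst) :=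
          List.subperm_of_subset hknd
            (fun k hk => hsub k ((PySem.Dict.contains_iff_mem_keys dd k).mpr hk))
        have := hsp.length_le
        simpa [PySem.Dict.keys, PySem.Dict.size] using this
      have hsz₁ : dist₁.size ≤ G.length := hkeylen dist₁ c5 c7
      -- the four facts about the final state p
      have hKey : (∀ w j, dist₁.get? w = some j → p.1.get? w = some j)
          ∧ (∀ w j, p.1.get? w = some j → dist₁.get? w = some j ∨ d < j)
          ∧ (∃ rest, p.2 = (order ++ cur) ++ rest ∧
              ∀ v ∈ rest, ∃ j, p.1.get? v = some j ∧ d + 1 ≤ j)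
          ∧ pvLoopA G V' nl fA
              = (PySem.List.pyRange (d + 1)
                  (p.1.getD ((PySem.List.pyGet? p.2 (-1)).getD 0) 0 + 1)).map
                  (pvGroup G p.1 p.2) := by
        have hval_last : dist₁.get? (cur.getLast hcur) = some d := by
          rw [c3 _ ((hmemV' _).mpr (Or.inr (List.getLast_mem hcur)))]
          exact H2 _ (List.getLast_mem hcur)
        rcases eq_or_ne nl [] with hnl0 | hnl0
        · have hpe : p = (dist₁, order ++ cur) := by
            rw [hp, hnl0]
            cases (fuelB - cur.length) <;> rfl
          refine ⟨fun w j h => by rw [hpe]; exact h,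
            fun w j h => Or.inl (by rw [hpe] at h; exact h),
            ⟨[], by rw [hpe]; simp, by simp⟩, ?_⟩
          rw [hnl0]
          have hL : pvLoopA G V' [] fA = [] := by cases fA <;> simp [pvLoopA]
          rw [hL, hpe]
          have hmax : dist₁.getD ((PySem.List.pyGet? (order ++ cur) (-1)).getD 0) 0 = d := by
            rw [pvPyGetLast, List.getLast?_append, List.getLast?_eq_some_getLast hcur]
            show dist₁.getD (cur.getLast hcur) 0 = d
            rw [PySem.Dict.getD_eq_get?_getD, hval_last, Option.getD_some]
          show ([] : List (List (Int × List Int)))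
              = (PySem.List.pyRange (d + 1)
                  (dist₁.getD ((PySem.List.pyGet? (order ++ cur) (-1)).getD 0) 0 + 1)).map
                  (pvGroup G dist₁ (order ++ cur))
          rw [hmax]
          have : PySem.List.pyRange (d + 1) (d + 1) = [] := by simp [PySem.List.pyRange]
          rw [this, List.map_nil]
        · -- apply the induction hypothesis one level deeper
          have H3₂ : ∀ w j, dist₁.get? w = some j → j ≤ d + 1 := by
            intro w j hj
            by_cases hwnl : w ∈ nl
            · have h2 := c2 w hwnl
              rw [hj] at h2
              have := Option.some.inj h2
              omega
            · have hc : dist₁.contains w = true := by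
                rw [PySem.Dict.contains_eq_isSome_get?, hj]; rfl
              have hw : w ∈ V' := ((c1 w).mp hc).resolve_right hwnl
              rw [c3 w hw] at hj
              have := H3 w j hj
              omega
          have H5₂ : ∀ v ∈ order ++ cur, ∃ j, dist₁.get? v = some j ∧ j < d + 1 := by
            intro v hv
            rcases List.mem_append.mp hv with hvo | hvc
            · obtain ⟨j, hj, hlt⟩ := H5 v hvo
              exact ⟨j, by rw [c3 v (hsome_mem v j hj)]; exact hj, by omega⟩
            · exact ⟨d, by rw [c3 v ((hmemV' v).mpr (Or.inr hvc))]; exact H2 v hvc, by omega⟩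
          have H6₂ : ∀ h : order ++ cur ≠ [],
              dist₁.get? ((order ++ cur).getLast h) = some (d + 1 - 1) := by
            intro h
            have hgl : (order ++ cur).getLast h = cur.getLast hcur := by
              have h1 : (order ++ cur).getLast? = some (cur.getLast hcur) := by
                rw [List.getLast?_append, List.getLast?_eq_some_getLast hcur]; rfl
              have h2 : (order ++ cur).getLast? = some ((order ++ cur).getLast h) :=
                List.getLast?_eq_some_getLast h
              rw [h1] at h2
              exact (Option.some.inj h2).symm
            rw [hgl, show d + 1 - 1 = d by omega]
            exact hval_last
          have hnlpos : 1 ≤ nl.length := List.length_pos_iff.mpr hnl0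
          obtain ⟨T1, T2, T3, T4⟩ := ih V' nl dist₁ (order ++ cur) (d + 1)
            (fuelB - cur.length) hnlR c1 c2 H3₂ (by rw [hnl]; exact PySem.Set.nodup_ofList _)
            H5₂ H6₂ (fun h => absurd h (List.append_ne_nil_of_right_ne_nil _ hcur))
            c7 c5 (by omega) (by omega)
          exact ⟨T2, fun w j h => (T3 w j h).imp id (fun hlt => by omega), T4, T1⟩
      obtain ⟨Fext, Fnew, ⟨rest, hrest, hrestval⟩, Ftail⟩ := hKey
      -- value of every vertex of cur in the final table
      have hcurval : ∀ v ∈ cur, p.1.get? v = some d := by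
        intro v hv
        exact Fext v d (by rw [c3 v ((hmemV' v).mpr (Or.inr hv))]; exact H2 v hv)
      -- the last element of p.2 carries the maximal distance, ≥ d
      have hlastval : ∃ u mj, p.2.getLast? = some u ∧ p.1.get? u = some mj ∧ d ≤ mj := by
        rcases eq_or_ne rest [] with hr | hr
        · refine ⟨cur.getLast hcur, d, ?_, hcurval _ (List.getLast_mem hcur), le_refl d⟩
          rw [hrest, hr, List.append_nil, List.getLast?_append,
            List.getLast?_eq_some_getLast hcur]
          rfl
        · obtain ⟨j, hj, hjge⟩ := hrestval _ (List.getLast_mem hr)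
          refine ⟨rest.getLast hr, j, ?_, hj, by omega⟩
          rw [hrest, List.getLast?_append, List.getLast?_eq_some_getLast hr]
          rfl
      obtain ⟨u, mj, hgl, hmj, hmjge⟩ := hlastval
      have hmF : p.1.getD ((PySem.List.pyGet? p.2 (-1)).getD 0) 0 = mj := by
        rw [pvPyGetLast p.2, hgl, Option.getD_some, PySem.Dict.getD_eq_get?_getD, hmj,
          Option.getD_some]
      -- the head of A's output equals B's level-d group read from the final table
      have hhead : pvGroup G p.1 p.2 d
          = cur.map (fun v => (v, (PySem.Set.ofList (pvEdges G V' v) : List Int))) := by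
        unfold pvGroup
        have hfilt : p.2.filter (fun v => p.1.getD v (-1) == d) = cur := by
          rw [hrest, List.filter_append, List.filter_append]
          have f1 : order.filter (fun v => p.1.getD v (-1) == d) = [] := by
            apply List.filter_eq_nil_iff.mpr
            intro v hv
            obtain ⟨j, hj, hlt⟩ := H5 v hv
            have hj₁ : p.1.get? v = some j :=
              Fext v j (by rw [c3 v (hsome_mem v j hj)]; exact hj)
            rw [PySem.Dict.getD_eq_get?_getD, hj₁, Option.getD_some]
            simp only [beq_iff_eq]
            omega
          have f2 : cur.filter (fun v => p.1.getD v (-1) == d) = cur := by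
            apply List.filter_eq_self.mpr
            intro v hv
            rw [PySem.Dict.getD_eq_get?_getD, hcurval v hv, Option.getD_some]
            simp
          have f3 : rest.filter (fun v => p.1.getD v (-1) == d) = [] := by
            apply List.filter_eq_nil_iff.mpr
            intro v hv
            obtain ⟨j, hj, hjge⟩ := hrestval v hv
            rw [PySem.Dict.getD_eq_get?_getD, hj, Option.getD_some]
            simp only [beq_iff_eq]
            omega
          rw [f1, f2, f3]
          simp
        rw [hfilt]
        rw [pvDictOfList_items _ (by
          simp only [List.map_map]
          exact ((List.map_congr_left (fun v _ => rfl)).trans (List.map_id cur)).symm ▸ H4)]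
        apply List.map_congr_left
        intro v hv
        have hedge : (pvAdj G v).filter (fun w => p.1.get? w == some (d + 1))
            = pvEdges G V' v := by
          unfold pvEdges
          apply List.filter_congr
          intro w hw
          by_cases hwV : w ∈ V'
          · obtain ⟨j, hj, hjle⟩ := hVval w hwV
            have hj₁ : p.1.get? w = some j := Fext w j (by rw [c3 w hwV]; exact hj)
            rw [hj₁]
            simp only [hwV, decide_true, Bool.not_true]
            rw [beq_eq_false_iff_ne]
            intro hcon
            have := Option.some.inj hcon
            omega
          · have hwnl : w ∈ nl := by
              rw [hnl]
              apply (PySem.Set.mem_ofList _ _).mpr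
              exact List.mem_flatMap.mpr ⟨v, hv, by
                unfold pvEdges
                exact List.mem_filter.mpr ⟨hw, by simp [hwV]⟩⟩
            have hj₁ : p.1.get? w = some (d + 1) := Fext w (d + 1) (c2 w hwnl)
            rw [hj₁]
            simp [hwV]
        rw [hedge]
      -- A's one unfolding step
      have hA : pvLoopA G V cur (fA + 1)
          = (cur.map (fun v => (v, (PySem.Set.ofList (pvEdges G V' v) : List Int))))
            :: pvLoopA G V' nl fA := by
        have hs := pvScanA_spec G V' cur H4
        simp only [pvLoopA]
        rw [if_neg hcur, ← hV', hs, ← hnl]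
      refine ⟨?_, ?_, ?_, ?_⟩
      · -- C1
        rw [hA, Ftail, hmF, PySem.List.pyRange_one_cons (show d < mj + 1 by omega),
          List.map_cons, hhead]
      · -- C2
        intro w j hj
        have hw : w ∈ V' := hsome_mem w j hj
        exact Fext w j (by rw [c3 w hw]; exact hj)
      · -- C3
        intro w j hj
        rcases Fnew w j hj with hj₁ | hlt
        · by_cases hwnl : w ∈ nl
          · have h2 := c2 w hwnl
            rw [hj₁] at h2
            have := Option.some.inj h2
            exact Or.inr (by omega : d < j)
          · have hc : dist₁.contains w = true := by
              rw [PySem.Dict.contains_eq_isSome_get?, hj₁]; rfl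
            have hw : w ∈ V' := ((c1 w).mp hc).resolve_right hwnl
            exact Or.inl (by rw [← c3 w hw]; exact hj₁)
        · exact Or.inr (by omega)
      · -- C4
        refine ⟨cur ++ rest, by rw [hrest, List.append_assoc], ?_⟩
        intro v hv
        rcases List.mem_append.mp hv with hv | hv
        · exact ⟨d, hcurval v hv, le_refl d⟩
        · obtain ⟨j, hj, hjge⟩ := hrestval v hv
          exact ⟨j, hj, by omega⟩

-- ===== VERDICT (by name: the statement is the Claim_ definition above) =====
theorem BreadthFirstLevels_spec : Claim_equal_BreadthFirstLevels := by
  intro G root _ hpre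
  obtain ⟨hnd, hreach⟩ := hpre
  have hroot : root ∈ G.map Prod.fst := hreach root (pvReachSet_root G root)
  have hGlen : 1 ≤ G.length := by
    have := List.length_pos_iff.mpr (List.ne_nil_of_mem hroot)
    simpa using this
  have hsz : (PySem.Dict.ofList [(root, (0 : Int))]).size = 1 := rfl
  have hof : PySem.Dict.ofList [(root, (0 : Int))] = PySem.Dict.empty.insert root 0 := rfl
  have hget : ∀ w j, (PySem.Dict.ofList [(root, (0 : Int))]).get? w = some j →
      w = root ∧ j = 0 := by
    intro w j h
    rw [hof] at h
    by_cases hw : w = root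
    · subst hw
      rw [PySem.Dict.get?_insert_self _ _ _] at h
      exact ⟨rfl, (Option.some.inj h).symm⟩
    · rw [PySem.Dict.get?_insert_of_ne _ _ hw, PySem.Dict.get?_empty] at h
      exact absurd h (by simp)
  obtain ⟨T1, _, _, _⟩ := pvMaster G (pvReachSet G root) hreach
    (pvReachSet_closed G hnd root) (G.length + 1) [] [root]
    (PySem.Dict.ofList [(root, (0 : Int))]) [] 0 (G.length + 1)
    (by intro v hv; rw [List.mem_singleton.mp hv]; exact pvReachSet_root G root)
    (by
      intro w
      rw [hof, PySem.Dict.contains_insert]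
      simp [PySem.Dict.contains_empty])
    (by
      intro v hv
      rw [List.mem_singleton.mp hv, hof]
      exact PySem.Dict.get?_insert_self _ _ _)
    (fun w j h => le_of_eq (hget w j h).2)
    (by simp)
    (by simp)
    (fun h => absurd rfl h)
    (fun _ => by simp)
    (fun w hc => by
      obtain ⟨j, hj⟩ := Option.isSome_iff_exists.mp
        (show ((PySem.Dict.ofList [(root, (0 : Int))]).get? w).isSome = true by
          rw [← PySem.Dict.contains_eq_isSome_get?]; exact hc)
      exact (hget w j hj).1 ▸ hroot)
    (by rw [hof]; exact PySem.Dict.nodup_keys_insert _ _ _ PySem.Dict.nodup_keys_empty)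
    (by rw [hsz]; omega)
    (by rw [hsz]; simp; omega)
  exact T1
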